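-- pv_equiv track=rewrite | github.com/dalmuri/Algorithm | 프로그래머스/3/77886. 110 옮기기/110 옮기기.py | ext
-- ===== SOURCE A (Python) =====
-- def ext(x):
--     stk = [];
--     num1 = 0
--     cnt = 0
--     for c in x:
--         if c == "1":
--             stk.append(c);
--             num1 += 1
--         else:
--             if num1 >= 2:
--                 stk.pop();
--                 stk.pop();
--                 num1 -= 2;
--                 cnt += 1
--             else:
--                 stk.append(c)
--                 num1 = 0
--
--     return ''.join(stk), cnt
-- ===== SOURCE B (Python) =====
-- # Repeatedly strip the leftmost occurrence of two ones followed by a different character until none remains,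
-- # counting removals; confluence of the unbordered pattern gives A's result.
-- def _find110(s):
--     for i in range(len(s) - 2):
--         if s[i] == '1' and s[i+1] == '1' and s[i+2] != '1':
--             return i
--     return None
--
-- def ext(x):
--     cnt = 0
--     while True:
--         i = _find110(x)
--         if i is None:
--             return x, cnt
--         x = x[:i] + x[i+3:]
--         cnt += 1
-- ===== Notes on version B (the rewrite author's own statement) =====
-- stated objective: alternative
-- what changed: Replaces the single-pass stack-with-counter scan by repeatedly finding and deleting the leftmost occurrence of two ones followed by a non-one character until the string is in normal form, counting deletions.
import Mathlib
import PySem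

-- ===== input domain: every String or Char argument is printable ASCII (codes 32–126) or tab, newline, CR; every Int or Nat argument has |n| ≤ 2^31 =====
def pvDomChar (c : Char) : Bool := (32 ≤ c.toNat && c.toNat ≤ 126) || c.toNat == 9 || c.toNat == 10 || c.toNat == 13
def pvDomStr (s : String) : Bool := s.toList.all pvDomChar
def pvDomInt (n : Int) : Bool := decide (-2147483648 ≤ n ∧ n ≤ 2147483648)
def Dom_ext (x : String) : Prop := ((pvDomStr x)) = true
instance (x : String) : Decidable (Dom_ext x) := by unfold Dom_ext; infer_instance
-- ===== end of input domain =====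

-- B replaces A's one-pass stack scan by repeatedly deleting the leftmost occurrence of two ones followed by a different character (alternative decomposition, not faster).

-- ===== PORT A =====
-- one step of A's loop; state = (stk, num1, cnt); stk.pop() is dropLast (stk has ≥ 2 elements whenever num1 ≥ 2, so Python's pop never raises)
def extStep (s : List Char × Int × Int) (c : Char) : List Char × Int × Int :=
  if c = '1' then (s.1 ++ [c], s.2.1 + 1, s.2.2)
  else if s.2.1 ≥ 2 then (s.1.dropLast.dropLast, s.2.1 - 2, s.2.2 + 1)
  else (s.1 ++ [c], 0, s.2.2)

def ext (x : String) : String × Int :=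
  let r := x.toList.foldl extStep ([], 0, 0)
  (String.mk r.1, r.2.2)

-- ===== PORT B =====
-- _find110: leftmost i with s[i]='1', s[i+1]='1', s[i+2]≠'1'
def findPat : List Char → Option Nat
  | a :: b :: c :: t =>
    if a = '1' ∧ b = '1' ∧ c ≠ '1' then some 0
    else (findPat (b :: c :: t)).map (· + 1)
  | _ => none

theorem findPat_le {l : List Char} {i : Nat} (h : findPat l = some i) : i + 3 ≤ l.length := by
  induction l generalizing i with
  | nil => simp [findPat] at h
  | cons a t ih =>
    match t, h with
    | b :: c :: t', h =>
      rw [findPat] at h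
      split at h
      · simp only [Option.some.injEq] at h
        subst h
        simp
      · simp only [Option.map_eq_some_iff] at h
        obtain ⟨j, hj, rfl⟩ := h
        have := ih hj
        simp at this ⊢
        omega

-- B's loop: remove the found occurrence (x[:i] + x[i+3:]) and recurse
def extRec (l : List Char) (cnt : Int) : List Char × Int :=
  match h : findPat l with
  | none => (l, cnt)
  | some i => extRec (l.take i ++ l.drop (i + 3)) (cnt + 1)
termination_by l.length
decreasing_by
  have := findPat_le h
  simp [List.length_take, List.length_drop]
  omega

def ext_alt (x : String) : String × Int :=
  let r := extRec x.toList 0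
  (String.mk r.1, r.2)

-- ===== PRECONDITION & SPEC =====
def Spec_ext (x : String) (out : String × Int) : Prop := out = ext_alt x
instance (x : String) (out : String × Int) : Decidable (Spec_ext x out) := by unfold Spec_ext; infer_instance

-- ===== CLAIM (what is proved, stated in full; the proofs are below) =====
def Claim_equal_ext : Prop := ∀ (x : String), Dom_ext x → Spec_ext x (ext x)

-- ===== LEMMAS AND PROOFS =====

-- A's fold with the stack kept reversed (cons at the front)
def goR : List Char → Int → Int → List Char → List Char × Int × Int
  | r, n, k, [] => (r, n, k)
  | r, n, k, c :: t =>
    if c = '1' then goR (c :: r) (n + 1) k t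
    else if n ≥ 2 then goR (r.drop 2) (n - 2) (k + 1) t
    else goR (c :: r) 0 k t

-- num1 eliminated: test the top two stack cells instead
def goP : List Char → Int → List Char → List Char × Int
  | r, k, [] => (r, k)
  | r, k, c :: t =>
    if c = '1' then goP (c :: r) k t
    else if r.take 2 = ['1', '1'] then goP (r.drop 2) (k + 1) t
    else goP (c :: r) k t

-- number of leading '1's (the reversed-stack reading of num1)
def ones : List Char → Int
  | [] => 0
  | c :: t => if c = '1' then ones t + 1 else 0

theorem ones_nonneg (l : List Char) : 0 ≤ ones l := by
  induction l with
  | nil => simp [ones]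
  | cons c t ih => simp only [ones]; split <;> omega

theorem ones_ge_two_iff (l : List Char) : 2 ≤ ones l ↔ l.take 2 = ['1', '1'] := by
  match l with
  | [] => simp [ones]
  | [a] =>
    simp only [ones, List.take]
    constructor
    · intro h; split at h <;> omega
    · simp
  | a :: b :: t =>
    have := ones_nonneg t
    simp only [ones, List.take]
    constructor
    · intro h
      split at h
      · split at h
        · simp_all
        · omega
      · omega
    · intro h
      simp at h
      obtain ⟨rfl, rfl⟩ := h
      simp
      omega

theorem dropLast_reverse (l : List Char) : l.reverse.dropLast = l.tail.reverse := by
  cases l with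
  | nil => simp
  | cons a t => simp

theorem foldl_eq_goR (t : List Char) : ∀ (r : List Char) (n k : Int),
    t.foldl extStep (r.reverse, n, k) =
      ((goR r n k t).1.reverse, (goR r n k t).2.1, (goR r n k t).2.2) := by
  induction t with
  | nil => intro r n k; simp [goR]
  | cons c t ih =>
    intro r n k
    simp only [List.foldl_cons, goR, extStep]
    by_cases h1 : c = '1'
    · have he : (r.reverse ++ [c] : List Char) = (c :: r).reverse := by simp
      rw [if_pos h1, if_pos h1, he, ih]
    · rw [if_neg h1, if_neg h1]
      by_cases h2 : n ≥ 2
      · rw [if_pos h2, if_pos h2]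
        have : r.reverse.dropLast.dropLast = (r.drop 2).reverse := by
          rw [dropLast_reverse, dropLast_reverse]
          cases r with
          | nil => rfl
          | cons a t => cases t <;> rfl
        rw [this, ih]
      · rw [if_neg h2, if_neg h2]
        have : (r.reverse ++ [c] : List Char) = (c :: r).reverse := by simp
        rw [this, ih]

theorem goR_eq_goP (t : List Char) : ∀ (r : List Char) (k : Int),
    ((goR r (ones r) k t).1, (goR r (ones r) k t).2.2) = goP r k t := by
  induction t with
  | nil => intro r k; simp [goR, goP]
  | cons c t ih =>
    intro r k
    simp only [goR, goP]
    by_cases h1 : c = '1'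
    · rw [if_pos h1, if_pos h1, h1]
      have h : ones ('1' :: r) = ones r + 1 := by simp [ones]
      rw [← h]
      exact ih _ k
    · rw [if_neg h1, if_neg h1]
      by_cases h2 : 2 ≤ ones r
      · rw [if_pos h2, if_pos ((ones_ge_two_iff r).mp h2)]
        obtain ⟨r'', hr⟩ : ∃ r'', r = '1' :: '1' :: r'' := by
          have := (ones_ge_two_iff r).mp h2
          match r, this with
          | a :: b :: t', h => simp at h; exact ⟨t', by simp [h.1, h.2]⟩
        subst hr
        have h4 : ones ('1' :: '1' :: r'') - 2 = ones r'' := by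
          simp [ones]
          omega
        have h5 : ('1' :: '1' :: r'' : List Char).drop 2 = r'' := rfl
        rw [h4, h5]
        exact ih r'' (k + 1)
      · rw [if_neg h2, if_neg (fun hc => h2 ((ones_ge_two_iff r).mpr hc))]
        have h : ones (c :: r) = 0 := by simp [ones, h1]
        rw [← h]
        exact ih _ k

-- an occurrence (two ones then a different character) at index i
def Pat (l : List Char) (i : Nat) : Prop :=
  l[i]? = some '1' ∧ l[i + 1]? = some '1' ∧
    ∃ c, l[i + 2]? = some c ∧ c ≠ '1'

theorem pat_lt {l : List Char} {i : Nat} (h : Pat l i) : i + 2 < l.length := by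
  obtain ⟨_, _, c, hc, _⟩ := h
  exact (List.getElem?_eq_some_iff.mp hc).1

theorem pat_succ (a : Char) (l : List Char) (i : Nat) : Pat (a :: l) (i + 1) ↔ Pat l i := by
  simp [Pat]

theorem pat_zero (a b c : Char) (t : List Char) :
    Pat (a :: b :: c :: t) 0 ↔ (a = '1' ∧ b = '1' ∧ c ≠ '1') := by
  simp [Pat]

theorem findPat_some_iff (l : List Char) (i : Nat) :
    findPat l = some i ↔ Pat l i ∧ ∀ j < i, ¬ Pat l j := by
  induction l generalizing i with
  | nil =>
    simp only [findPat]
    constructor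
    · intro h; cases h
    · rintro ⟨hp, -⟩; exact absurd (pat_lt hp) (by simp)
  | cons a t ih =>
    match t with
    | [] =>
      simp only [findPat]
      constructor
      · intro h; cases h
      · rintro ⟨hp, -⟩; exact absurd (pat_lt hp) (by simp)
    | [b] =>
      simp only [findPat]
      constructor
      · intro h; cases h
      · rintro ⟨hp, -⟩; have := pat_lt hp; simp at this
    | b :: c :: t'' =>
      rw [findPat]
      split
      · rename_i hc
        constructor
        · rintro h
          obtain rfl : i = 0 := by cases h; rfl
          exact ⟨(pat_zero a b c t'').mpr hc, by omega⟩
        · rintro ⟨hp, hmin⟩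
          cases i with
          | zero => rfl
          | succ k => exact absurd ((pat_zero a b c t'').mpr hc) (hmin 0 (by omega))
      · rename_i hc
        simp only [Option.map_eq_some_iff]
        constructor
        · rintro ⟨j, hj, rfl⟩
          obtain ⟨hp, hmin⟩ := (ih j).mp hj
          refine ⟨(pat_succ a _ j).mpr hp, ?_⟩
          intro j' hj'
          cases j' with
          | zero => intro h0; exact hc ((pat_zero a b c t'').mp h0)
          | succ k => intro hk; exact hmin k (by omega) ((pat_succ a _ k).mp hk)
        · rintro ⟨hp, hmin⟩
          cases i with
          | zero => exact absurd ((pat_zero a b c t'').mp hp) hc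
          | succ k =>
            refine ⟨k, (ih k).mpr ⟨(pat_succ a _ k).mp hp, ?_⟩, rfl⟩
            intro j hj hpj
            exact hmin (j + 1) (by omega) ((pat_succ a _ j).mpr hpj)

theorem pat_find {l : List Char} {i : Nat} (hp : Pat l i) : ∃ j, findPat l = some j := by
  induction l generalizing i with
  | nil => exact absurd (pat_lt hp) (by simp)
  | cons a t ih =>
    match t with
    | [] => exact absurd (pat_lt hp) (by simp)
    | [b] => have := pat_lt hp; simp at this
    | b :: c :: t'' =>
      rw [findPat]
      split
      · exact ⟨0, rfl⟩
      · rename_i hc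
        cases i with
        | zero => exact absurd ((pat_zero a b c t'').mp hp) hc
        | succ k =>
          obtain ⟨j, hj⟩ := ih ((pat_succ a _ k).mp hp)
          exact ⟨j + 1, by rw [hj]; rfl⟩

theorem findPat_none_iff (l : List Char) : findPat l = none ↔ ∀ i, ¬ Pat l i := by
  constructor
  · intro h i hp
    obtain ⟨j, hj⟩ := pat_find hp
    rw [h] at hj; cases hj
  · intro h
    cases hf : findPat l with
    | none => rfl
    | some j => exact absurd ((findPat_some_iff l j).mp hf).1 (h j)

theorem pat_append_left {l m : List Char} {i : Nat} (hp : Pat l i) : Pat (l ++ m) i := by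
  have h3 := pat_lt hp
  obtain ⟨h1, h2, c, hc, hne⟩ := hp
  refine ⟨?_, ?_, c, ?_, hne⟩
  · rw [List.getElem?_append_left (by omega)]; exact h1
  · rw [List.getElem?_append_left (by omega)]; exact h2
  · rw [List.getElem?_append_left h3]; exact hc

theorem pat_of_append_lt {l m : List Char} {i : Nat} (hp : Pat (l ++ m) i)
    (hlt : i + 2 < l.length) : Pat l i := by
  obtain ⟨h1, h2, c, hc, hne⟩ := hp
  rw [List.getElem?_append_left (by omega)] at h1
  rw [List.getElem?_append_left (by omega)] at h2
  rw [List.getElem?_append_left hlt] at hc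
  exact ⟨h1, h2, c, hc, hne⟩

theorem noPat_prefix {l m : List Char} (h : ∀ i, ¬ Pat (l ++ m) i) : ∀ i, ¬ Pat l i :=
  fun i hp => h i (pat_append_left hp)

theorem noPat_snoc_one {l : List Char} (h : ∀ i, ¬ Pat l i) : ∀ i, ¬ Pat (l ++ ['1']) i := by
  intro i hp
  have hlt := pat_lt hp
  simp only [List.length_append, List.length_cons, List.length_nil] at hlt
  by_cases hc : i + 2 < l.length
  · exact h i (pat_of_append_lt hp hc)
  · obtain ⟨-, -, c, hc2, hne⟩ := hp
    have he : i + 2 = l.length := by omega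
    rw [List.getElem?_append_right (by omega)] at hc2
    rw [he, Nat.sub_self] at hc2
    simp at hc2
    exact hne (hc2.symm)

theorem take_two_of_heads {l : List Char} (h0 : l[0]? = some '1') (h1 : l[1]? = some '1') :
    l.take 2 = ['1', '1'] := by
  match l with
  | [] => simp at h0
  | [a] => simp at h1
  | a :: b :: t =>
    simp only [List.getElem?_cons_zero, Option.some.injEq] at h0
    have : b = '1' := by simpa using h1
    simp [h0, this]

theorem noPat_snoc {l : List Char} {c : Char} (h : ∀ i, ¬ Pat l i)
    (hend : l.reverse.take 2 ≠ ['1', '1']) : ∀ i, ¬ Pat (l ++ [c]) i := by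
  intro i hp
  have hlt := pat_lt hp
  simp only [List.length_append, List.length_cons, List.length_nil] at hlt
  by_cases hc : i + 2 < l.length
  · exact h i (pat_of_append_lt hp hc)
  · have he : i + 2 = l.length := by omega
    obtain ⟨h1, h2, d, -, -⟩ := hp
    rw [List.getElem?_append_left (by omega)] at h1
    rw [List.getElem?_append_left (by omega)] at h2
    apply hend
    apply take_two_of_heads
    · rw [List.getElem?_reverse (by omega)]
      have hx : l.length - 1 - 0 = i + 1 := by omega
      rw [hx]; exact h2
    · rw [List.getElem?_reverse (by omega)]
      have hx : l.length - 1 - 1 = i := by omega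
      rw [hx]; exact h1

theorem getElem?_agree2 (w t : List Char) (c : Char) (idx : Nat) (h : idx < w.length + 2) :
    (w ++ '1' :: '1' :: c :: t)[idx]? = (w ++ ['1', '1'])[idx]? := by
  by_cases hl : idx < w.length
  · rw [List.getElem?_append_left hl, List.getElem?_append_left hl]
  · rw [List.getElem?_append_right (by omega), List.getElem?_append_right (by omega)]
    have : idx - w.length = 0 ∨ idx - w.length = 1 := by omega
    rcases this with h2 | h2 <;> rw [h2] <;> rfl

theorem findPat_boundary {w t : List Char} {c : Char} (hw : ∀ i, ¬ Pat (w ++ ['1', '1']) i)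
    (hc : c ≠ '1') : findPat (w ++ '1' :: '1' :: c :: t) = some w.length := by
  rw [findPat_some_iff]
  constructor
  · refine ⟨?_, ?_, c, ?_, hc⟩
    · rw [List.getElem?_append_right (by omega), Nat.sub_self]; rfl
    · rw [List.getElem?_append_right (by omega)]
      have : w.length + 1 - w.length = 1 := by omega
      rw [this]; rfl
    · rw [List.getElem?_append_right (by omega)]
      have : w.length + 2 - w.length = 2 := by omega
      rw [this]; rfl
  · intro j hj hp
    apply hw j
    have hlt : j + 2 < w.length + 2 := by omega
    obtain ⟨h1, h2, d, hd, hne⟩ := hp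
    rw [getElem?_agree2 w t c j (by omega)] at h1
    rw [getElem?_agree2 w t c (j + 1) (by omega)] at h2
    rw [getElem?_agree2 w t c (j + 2) (by omega)] at hd
    exact ⟨h1, h2, d, hd, hne⟩

theorem extRec_none {l : List Char} {k : Int} (h : findPat l = none) : extRec l k = (l, k) := by
  rw [extRec.eq_def]
  split
  · rfl
  · rename_i i heq; rw [h] at heq; cases heq

theorem extRec_some {l : List Char} {k : Int} {i : Nat} (h : findPat l = some i) :
    extRec l k = extRec (l.take i ++ l.drop (i + 3)) (k + 1) := by
  rw [extRec.eq_def]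
  split
  · rename_i heq; rw [h] at heq; cases heq
  · rename_i j heq
    rw [h] at heq
    cases heq
    rfl

theorem main_lemma (t : List Char) : ∀ (r : List Char) (k : Int),
    (∀ i, ¬ Pat r.reverse i) →
    extRec (r.reverse ++ t) k = ((goP r k t).1.reverse, (goP r k t).2) := by
  induction t with
  | nil =>
    intro r k h
    simp only [List.append_nil, goP]
    rw [extRec_none ((findPat_none_iff _).mpr h)]
  | cons c t ih =>
    intro r k h
    by_cases h1 : c = '1'
    · subst h1
      have he : r.reverse ++ '1' :: t = ('1' :: r).reverse ++ t := by simp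
      rw [he, ih _ k (by rw [List.reverse_cons]; exact noPat_snoc_one h)]
      simp [goP]
    · by_cases h2 : r.take 2 = ['1', '1']
      · obtain ⟨r'', rfl⟩ : ∃ r'', r = '1' :: '1' :: r'' := by
          match r, h2 with
          | a :: b :: t', h2 => simp at h2; exact ⟨t', by simp [h2.1, h2.2]⟩
        have hw : ('1' :: '1' :: r'' : List Char).reverse = r''.reverse ++ ['1', '1'] := by simp
        rw [hw] at h
        have he : ('1' :: '1' :: r'' : List Char).reverse ++ c :: t
            = r''.reverse ++ '1' :: '1' :: c :: t := by simp
        rw [he, extRec_some (findPat_boundary h h1)]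
        have htk : (r''.reverse ++ '1' :: '1' :: c :: t).take r''.reverse.length = r''.reverse :=
          List.take_left
        have hdr : (r''.reverse ++ '1' :: '1' :: c :: t).drop (r''.reverse.length + 3) = t := by
          rw [List.drop_length_add_append]; rfl
        rw [htk, hdr, ih r'' (k + 1) (noPat_prefix h)]
        simp only [goP, if_neg h1, if_pos h2]
        rfl
      · have he : r.reverse ++ c :: t = (c :: r).reverse ++ t := by simp
        have hnp : ∀ i, ¬ Pat (c :: r).reverse i := by
          rw [List.reverse_cons]
          exact noPat_snoc h (by rw [List.reverse_reverse]; exact h2)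
        rw [he, ih _ k hnp]
        simp only [goP, if_neg h1, if_neg h2]

-- ===== VERDICT (by name: the statement is the Claim_ definition above) =====
theorem ext_spec : Claim_equal_ext := by
  intro x _
  unfold Spec_ext ext ext_alt
  have h1 := foldl_eq_goR x.toList [] 0 0
  have h2 := goR_eq_goP x.toList [] 0
  have h3 := main_lemma x.toList [] 0 (by intro i hp; simp [Pat] at hp)
  simp only [List.reverse_nil, List.nil_append] at h1 h3
  simp only [ones] at h2
  rw [h1, h3]
  rw [← h2]
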